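-- pv_equiv track=rewrite | github.com/Cremily/Programming-Challenges | gravity_tumblr.py | tumble
-- ===== SOURCE A (Python) =====
-- def count_hash(line):
--     x = 0
--     for char in line:
--         if char == "#":
--             x += 1
--     return x
--
-- def hash_until(hash_map):
--     count_list = []
--     for line in hash_map:
--         count_list.append(count_hash(line))
--     return(count_list)
--
-- def tumble(width,height,hash_map):
--     new_map = [ [] for x in range(width)]
--     hash_count = hash_until(hash_map)
--     for line_num,line in enumerate(new_map):
--         for count in hash_count:
--             if count >= width - line_num:
--                 line.append('#')
--             else:
--                 line.append('.')
--     return height,width,new_map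
-- ===== SOURCE B (Python) =====
-- def tumble(width, height, hash_map):
--     counts = [line.count('#') for line in hash_map]
--     cols = [['.'] * max(0, width - c) + ['#'] * min(c, width) for c in counts]
--     new_map = [[col[i] for col in cols] for i in range(width)]
--     return height, width, new_map
-- ===== Notes on version B (the rewrite author's own statement) =====
-- stated objective: alternative
-- what changed: B replaces A's row-by-row nested loops (appending a cell per count into each of width mutable rows) by building each settled column once from its clamped hash count ('.'*max(0,width-c)+'#'*min(c,width)) and then transposing by indexing, so rows are read off columns instead of being grown cell by cell.
import Mathlib
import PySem

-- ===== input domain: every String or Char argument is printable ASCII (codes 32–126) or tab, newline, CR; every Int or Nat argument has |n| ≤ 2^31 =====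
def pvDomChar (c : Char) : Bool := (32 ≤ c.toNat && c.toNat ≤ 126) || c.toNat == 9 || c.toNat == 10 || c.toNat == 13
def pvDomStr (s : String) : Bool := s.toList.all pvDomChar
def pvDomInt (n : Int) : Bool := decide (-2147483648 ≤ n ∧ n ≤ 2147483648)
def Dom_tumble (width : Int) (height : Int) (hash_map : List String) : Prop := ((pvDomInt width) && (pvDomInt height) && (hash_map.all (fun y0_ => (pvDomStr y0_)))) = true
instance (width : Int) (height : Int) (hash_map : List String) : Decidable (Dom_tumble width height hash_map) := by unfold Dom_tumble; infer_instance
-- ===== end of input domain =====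

-- B builds each settled column directly from its clamped '#' count and transposes, instead of A's
-- growing width mutable rows cell by cell (objective: alternative decomposition, same cost).

-- ===== PORT A =====
-- count_hash: character loop with an accumulator
def pvCountHash (line : String) : Int :=
  line.toList.foldl (fun x ch => if ch = '#' then x + 1 else x) 0

-- hash_until: append loop over hash_map
def pvHashUntil (hash_map : List String) : List Int :=
  hash_map.foldl (fun acc line => acc ++ [pvCountHash line]) []

def tumble (width : Int) (height : Int) (hash_map : List String) : Int × Int × List (List String) :=
  let new_map0 : List (List String) := (PySem.List.pyRange 0 width 1).map (fun _ => [])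
  let hash_count := pvHashUntil hash_map
  let new_map := (PySem.List.enumerate new_map0 0).map (fun p =>
    hash_count.foldl (fun line count =>
      line ++ [if count ≥ width - p.1 then "#" else "."]) p.2)
  (height, width, new_map)

-- ===== PORT B =====
-- settled column for a hash count c (clamped to the column height width)
def pvColOf (width : Int) (c : Int) : List String :=
  List.replicate (max 0 (width - c)).toNat "." ++ List.replicate (min c width).toNat "#"

def tumble_alt (width : Int) (height : Int) (hash_map : List String) : Int × Int × List (List String) :=
  let counts := hash_map.map (fun line => (PySem.Str.count line "#" : Int))
  let cols := counts.map (pvColOf width)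
  -- col[i]: the index is always in range (each column has length width), so pyGetD is exact here
  let new_map := (PySem.List.pyRange 0 width 1).map (fun i =>
    cols.map (fun col => PySem.List.pyGetD col i ""))
  (height, width, new_map)

-- ===== PRECONDITION & SPEC =====
def Spec_tumble (width : Int) (height : Int) (hash_map : List String) (out : Int × Int × List (List String)) : Prop := out = tumble_alt width height hash_map
instance (width : Int) (height : Int) (hash_map : List String) (out : Int × Int × List (List String)) : Decidable (Spec_tumble width height hash_map out) := by unfold Spec_tumble; infer_instance

-- ===== CLAIM (what is proved, stated in full; the proofs are below) =====
def Claim_equal_tumble : Prop := ∀ (width : Int) (height : Int) (hash_map : List String), Dom_tumble width height hash_map → Spec_tumble width height hash_map (tumble width height hash_map)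

-- ===== LEMMAS AND PROOFS =====

-- Python's str.count for a single character equals List.count over the characters
theorem pvCount_go_singleton (c : Char) (l : List Char) (fuel acc : Nat)
    (h : l.length ≤ fuel) :
    PySem.Chars.count.go [c] fuel l acc = acc + l.count c := by
  induction l generalizing fuel acc with
  | nil => cases fuel <;> simp [PySem.Chars.count.go]
  | cons hd tl ih =>
    cases fuel with
    | zero => simp at h
    | succ n =>
      simp only [List.length_cons, Nat.succ_le_succ_iff] at h
      rw [PySem.Chars.count.go]
      by_cases hc : hd = c
      · subst hc
        simp [List.isPrefixOf, ih _ _ h]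
        omega
      · have : [c].isPrefixOf (hd :: tl) = false := by
          simp [List.isPrefixOf, Ne.symm hc]
        simp [this, ih _ _ h, hc]

theorem pvStrCount_singleton (s : String) (c : Char) :
    PySem.Str.count s (String.ofList [c]) = s.toList.count c := by
  rw [PySem.Str.count_eq]
  have h1 : (String.ofList [c]).toList = [c] := by simp
  rw [h1]
  unfold PySem.Chars.count
  simp only [List.isEmpty_cons, if_false, Bool.false_eq_true]
  rw [pvCount_go_singleton c s.toList s.toList.length 0 le_rfl]
  omega

-- A's character loop computes the same count
theorem pvCountHash_eq (line : String) :
    pvCountHash line = (PySem.Str.count line "#" : Int) := by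
  unfold pvCountHash
  have : "#" = String.ofList ['#'] := rfl
  rw [this, pvStrCount_singleton]
  rw [PySem.List.foldl_ite_add_one (p := fun ch => ch = '#')]
  rw [zero_add, Nat.cast_inj, List.count_eq_countP]
  apply List.countP_congr
  intro a _
  simp only [decide_eq_true_eq, beq_iff_eq]

-- the settled column read at row i is A's cell
theorem pvColOf_get (width i c : Int) (h0 : 0 ≤ i) (hw : i < width) (hc : 0 ≤ c) :
    PySem.List.pyGetD (pvColOf width c) i "" = (if c ≥ width - i then "#" else ".") := by
  unfold pvColOf
  have hlen : ((max 0 (width - c)).toNat + (min c width).toNat : Int) = width := by omega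
  have hi : i.toNat < (List.replicate (max 0 (width - c)).toNat "." ++ List.replicate (min c width).toNat "#").length := by
    simp [List.length_append]
    omega
  rw [show i = (i.toNat : Int) by omega, PySem.List.pyGetD_natCast]
  rw [List.getD_eq_getElem?_getD, List.getElem?_append]
  simp only [List.length_replicate]
  by_cases hlt : i.toNat < (max 0 (width - c)).toNat
  · rw [if_pos hlt, List.getElem?_replicate, if_pos hlt]
    rw [if_neg (by omega)]
    rfl
  · rw [if_neg hlt, List.getElem?_replicate,
      if_pos (show i.toNat - (max 0 (width - c)).toNat < (min c width).toNat by omega)]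
    rw [if_pos (by omega)]
    rfl

-- ===== VERDICT (by name: the statement is the Claim_ definition above) =====
theorem tumble_spec : Claim_equal_tumble := by
  intro width height hash_map _
  unfold Spec_tumble tumble tumble_alt
  simp only [Prod.mk.injEq, true_and]
  -- both sides: maps over pyRange 0 width 1
  rw [PySem.List.enumerate_eq_map_pyRange (d := [])]
  rw [pvHashUntil, PySem.List.foldl_append_singleton_eq_map]
  have hlen : (PySem.List.len ((PySem.List.pyRange 0 width 1).map (fun _ => ([] : List String)))) = ((width.toNat : Int)) := by
    simp [PySem.List.len, PySem.List.length_pyRange_one]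
  rw [hlen, List.map_map]
  rcases le_or_gt width 0 with hneg | hpos
  · rw [PySem.List.pyRange_one_eq_nil (by omega), PySem.List.pyRange_one_eq_nil (by omega)]
    simp
  · rw [show ((width.toNat : Int)) = width by omega]
    apply List.map_congr_left
    intro j hj
    rw [PySem.List.mem_pyRange_one] at hj
    simp only [Function.comp]
    have hgd : PySem.List.pyGetD ((PySem.List.pyRange 0 width 1).map (fun _ => ([] : List String))) j ([] : List String) = [] :=
      PySem.List.pyGetD_map (fun _ => ([] : List String)) (PySem.List.pyRange 0 width 1) j 0
    rw [hgd]
    rw [PySem.List.foldl_append_singleton_eq_map]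
    simp only [List.nil_append]
    rw [List.map_map, List.map_map, List.map_map]
    apply List.map_congr_left
    intro line _
    simp only [Function.comp]
    rw [pvCountHash_eq]
    rw [pvColOf_get width j _ hj.1 hj.2 (by positivity)]
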